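-- pv_equiv track=rewrite | github.com/chiarasteffen/car_sales_prediction | app.py | extract_flags
-- ===== SOURCE A (Python) =====
-- TRIM_OPTIONS = ["Sport","Limited","LX","SE","Touring","Premium"]
--
-- def extract_flags(trim_list):
--     flags = {f"has_{opt.lower()}":0 for opt in TRIM_OPTIONS}
--     for t in (trim_list or []):
--         key = t.lower()
--         for opt in TRIM_OPTIONS:
--             if opt.lower() in key:
--                 flags[f"has_{opt.lower()}"] = 1
--     return flags
-- ===== SOURCE B (Python) =====
-- TRIM_OPTIONS = ["Sport","Limited","LX","SE","Touring","Premium"]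
--
-- def extract_flags(trim_list):
--     # Flatten the lowercased trims into one newline-separated text; since no option
--     # contains a newline, a substring hit in the blob is exactly a hit in some trim.
--     blob = "\n".join(t.lower() for t in (trim_list or []))
--     return {f"has_{opt.lower()}": int(opt.lower() in blob) for opt in TRIM_OPTIONS}
-- ===== Notes on version B (the rewrite author's own statement) =====
-- stated objective: faster
-- what changed: B joins all lowercased trims into one newline-separated blob and answers each flag with a single substring test on that blob, instead of A's nested scan that mutates a pre-initialized dict per trim per option; correct because no option contains a newline, so a blob match lies inside exactly one trim.
import Mathlib
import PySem

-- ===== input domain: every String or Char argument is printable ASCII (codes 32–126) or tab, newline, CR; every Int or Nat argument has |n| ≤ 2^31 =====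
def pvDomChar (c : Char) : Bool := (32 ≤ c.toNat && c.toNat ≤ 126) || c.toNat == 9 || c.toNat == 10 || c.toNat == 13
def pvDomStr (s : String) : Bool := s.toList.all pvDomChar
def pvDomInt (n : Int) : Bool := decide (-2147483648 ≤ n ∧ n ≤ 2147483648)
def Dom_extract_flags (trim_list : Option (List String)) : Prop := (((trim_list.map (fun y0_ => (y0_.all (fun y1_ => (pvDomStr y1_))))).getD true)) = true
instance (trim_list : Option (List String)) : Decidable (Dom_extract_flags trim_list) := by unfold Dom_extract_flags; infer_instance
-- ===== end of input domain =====

-- B flattens the lowercased trims into one newline-separated text and answers each flag with a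
-- single substring test on that blob (no per-option scan over the trims); correct because no
-- option contains a newline, so a match in the blob lies inside exactly one trim.

def TRIM_OPTIONS : List String := ["Sport", "Limited", "LX", "SE", "Touring", "Premium"]

-- ===== PORT A =====
def extract_flags (trim_list : Option (List String)) : List (String × Int) :=
  let flags : PySem.Dict String Int :=
    TRIM_OPTIONS.foldl (fun d opt => d.insert ("has_" ++ PySem.Str.lower opt) 0) PySem.Dict.empty
  let flags :=
    (trim_list.getD []).foldl (fun d t =>
      let key := PySem.Str.lower t
      TRIM_OPTIONS.foldl (fun d opt =>
        if PySem.Str.isIn (PySem.Str.lower opt) key then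
          d.insert ("has_" ++ PySem.Str.lower opt) 1
        else d) d) flags
  flags.items

-- ===== PORT B =====
def extract_flags_alt (trim_list : Option (List String)) : List (String × Int) :=
  let blob := PySem.Str.join "\n" (((trim_list.getD []).map PySem.Str.lower))
  TRIM_OPTIONS.map (fun opt =>
    ("has_" ++ PySem.Str.lower opt,
      if PySem.Str.isIn (PySem.Str.lower opt) blob then (1 : Int) else 0))

-- ===== PRECONDITION & SPEC =====
def Spec_extract_flags (trim_list : Option (List String)) (out : List (String × Int)) : Prop := out = extract_flags_alt trim_list
instance (trim_list : Option (List String)) (out : List (String × Int)) : Decidable (Spec_extract_flags trim_list out) := by unfold Spec_extract_flags; infer_instance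

-- ===== CLAIM (what is proved, stated in full; the proofs are below) =====
def Claim_equal_extract_flags : Prop := ∀ (trim_list : Option (List String)), Dom_extract_flags trim_list → Spec_extract_flags trim_list (extract_flags trim_list)

-- ===== LEMMAS AND PROOFS =====

def pvKey (o : String) : String := "has_" ++ PySem.Str.lower o

-- inserting 1 at the key of a member option rewrites exactly that option's value
theorem pv_insert_map (opts : List String) (v : String → Int) (o : String) (ho : o ∈ opts)
    (hinj : ∀ a ∈ opts, ∀ b ∈ opts, pvKey a = pvKey b → a = b)
    (d : PySem.Dict String Int) (hd : d.items = opts.map (fun x => (pvKey x, v x))) :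
    (d.insert (pvKey o) 1).items = opts.map (fun x => (pvKey x, if x = o then 1 else v x)) := by
  have hc : d.contains (pvKey o) = true := by
    rw [PySem.Dict.contains_iff_mem_keys]
    simp only [PySem.Dict.keys, hd, List.map_map]
    exact List.mem_map_of_mem ho
  rw [PySem.Dict.items_insert, hc, if_pos rfl, hd, List.map_map]
  refine List.map_congr_left (fun x hx => ?_)
  simp only [Function.comp]
  by_cases hxo : x = o
  · subst hxo; simp
  · have hne : (pvKey x == pvKey o) = false := by
      simp only [beq_eq_false_iff_ne, ne_eq]
      intro h; exact hxo (hinj x hx o ho h)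
    simp [hne, hxo]

-- one pass of the inner loop: sets the flags of the options matching the test m
theorem pv_inner (opts : List String)
    (hinj : ∀ a ∈ opts, ∀ b ∈ opts, pvKey a = pvKey b → a = b)
    (m : String → Bool) (opts2 : List String) (h2 : ∀ x ∈ opts2, x ∈ opts)
    (v : String → Int) (d : PySem.Dict String Int)
    (hd : d.items = opts.map (fun x => (pvKey x, v x))) :
    (opts2.foldl (fun d opt => if m opt then d.insert (pvKey opt) 1 else d) d).items
      = opts.map (fun x => (pvKey x, if x ∈ opts2 ∧ m x = true then 1 else v x)) := by
  induction opts2 generalizing v d with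
  | nil => simpa using hd
  | cons o os ih =>
    simp only [List.foldl_cons]
    have ho : o ∈ opts := h2 o (by simp)
    by_cases hm : m o = true
    · rw [if_pos hm,
        ih (fun x hx => h2 x (by simp [hx])) (fun x => if x = o then 1 else v x)
          _ (pv_insert_map opts v o ho hinj d hd)]
      refine List.map_congr_left (fun x hx => ?_)
      by_cases h1 : x ∈ os ∧ m x = true
      · simp [h1]
      · rw [if_neg h1]
        by_cases hxo : x = o
        · subst hxo; simp [hm]
        · simp only [if_neg hxo]
          have hno : ¬ (x ∈ o :: os ∧ m x = true) := by
            intro ⟨hmem, hmt⟩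
            rcases List.mem_cons.mp hmem with h | h
            · exact hxo h
            · exact h1 ⟨h, hmt⟩
          rw [if_neg hno]
    · rw [if_neg hm, ih (fun x hx => h2 x (by simp [hx])) v d hd]
      refine List.map_congr_left (fun x hx => ?_)
      by_cases hxo : x = o
      · subst hxo; simp [hm]
      · have hiff : x ∈ o :: os ↔ x ∈ os := by simp [hxo]
        simp [hiff]

-- the outer loop over the trims: a flag ends up 1 iff some trim matches it
theorem pv_outer (opts : List String)
    (hinj : ∀ a ∈ opts, ∀ b ∈ opts, pvKey a = pvKey b → a = b)
    (m : String → String → Bool) (ts : List String) (v : String → Int)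
    (d : PySem.Dict String Int)
    (hd : d.items = opts.map (fun x => (pvKey x, v x))) :
    (ts.foldl (fun d t =>
        opts.foldl (fun d opt => if m opt t then d.insert (pvKey opt) 1 else d) d) d).items
      = opts.map (fun x => (pvKey x, if ts.any (fun t => m x t) then 1 else v x)) := by
  induction ts generalizing v d with
  | nil => simpa using hd
  | cons t ts ih =>
    simp only [List.foldl_cons]
    rw [ih (fun x => if x ∈ opts ∧ m x t = true then 1 else v x)
        _ (pv_inner opts hinj (fun opt => m opt t) opts (fun _ h => h) v d hd)]
    refine List.map_congr_left (fun x hx => ?_)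
    by_cases hm : m x t = true
    · simp [hm, hx]
    · simp [hm, hx]

theorem pv_init :
    (TRIM_OPTIONS.foldl (fun d opt => d.insert ("has_" ++ PySem.Str.lower opt) 0)
        (PySem.Dict.empty : PySem.Dict String Int)).items
      = TRIM_OPTIONS.map (fun x => (pvKey x, (0 : Int))) := by decide

theorem pv_inj : ∀ a ∈ TRIM_OPTIONS, ∀ b ∈ TRIM_OPTIONS, pvKey a = pvKey b → a = b := by decide

-- every lowered option is nonempty and free of the separator '\n'
theorem pv_opts_ok : ∀ x ∈ TRIM_OPTIONS,
    PySem.Chars.lower x.toList ≠ [] ∧ '\n' ∉ PySem.Chars.lower x.toList := by decide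

-- a separator-free pattern is an infix of a ++ c :: b iff it is an infix of a part
theorem pv_infix_split (p : List Char) (c : Char) (hc : c ∉ p) :
    ∀ (a b : List Char), (p <:+: a ++ c :: b ↔ p <:+: a ∨ p <:+: b) := by
  intro a b
  constructor
  · induction a with
    | nil =>
      intro h
      rcases List.infix_cons_iff.mp h with hpre | hinf
      · cases p with
        | nil => exact Or.inr List.nil_infix
        | cons x xs =>
          have : x = c := (List.cons_prefix_cons.mp hpre).1
          exact absurd (this ▸ List.mem_cons_self) hc
      · exact Or.inr hinf
    | cons x a' ih =>
      intro h
      rcases List.infix_cons_iff.mp h with hpre | hinf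
      · -- p is a prefix of x :: (a' ++ c :: b); it cannot reach past a'
        have hlen : p.length ≤ (x :: a').length := by
          by_contra hgt
          push Not at hgt
          have hidx : (x :: a').length < p.length := hgt
          have hget := hpre.getElem hidx
          have hcval : p[(x :: a').length]'hidx = c := by
            rw [hget]
            simp [List.getElem_append_right]
          exact hc (hcval ▸ p.getElem_mem hidx)
        have hpre2 : p <+: x :: a' :=
          List.prefix_of_prefix_length_le hpre (List.prefix_append _ _) (by simpa using hlen)
        exact Or.inl hpre2.isInfix
      · rcases ih hinf with h1 | h2
        · exact Or.inl (h1.trans (List.infix_cons List.infix_rfl))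
        · exact Or.inr h2
  · rintro (h | h)
    · obtain ⟨u, v, huv⟩ := h
      exact ⟨u, v ++ c :: b, by rw [← huv]; simp⟩
    · obtain ⟨u, v, huv⟩ := h
      exact ⟨a ++ c :: u, v, by rw [← huv]; simp⟩

-- a separator-free nonempty pattern is in the joined text iff it is in some part
theorem pv_isIn_join (p : List Char) (c : Char) (hp : p ≠ []) (hc : c ∉ p) :
    ∀ (parts : List (List Char)),
      (p <:+: PySem.Chars.join [c] parts ↔ ∃ t ∈ parts, p <:+: t) := by
  intro parts
  induction parts with
  | nil =>
    rw [PySem.Chars.join_nil]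
    simp [List.infix_nil, hp]
  | cons t rest ih =>
    cases rest with
    | nil =>
      rw [PySem.Chars.join_singleton]
      simp
    | cons t' rest' =>
      rw [PySem.Chars.join_cons_cons, List.append_assoc, List.singleton_append,
        pv_infix_split p c hc]
      rw [ih]
      constructor
      · rintro (h | ⟨u, hu, hpu⟩)
        · exact ⟨t, by simp, h⟩
        · exact ⟨u, by simp [hu], hpu⟩
      · rintro ⟨u, hu, hpu⟩
        rcases List.mem_cons.mp hu with h | h
        · exact Or.inl (h ▸ hpu)
        · exact Or.inr ⟨u, h, hpu⟩

-- the flattened substring test agrees with the per-trim existence test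
theorem pv_blob (x : String) (hx : x ∈ TRIM_OPTIONS) (ts : List String) :
    PySem.Str.isIn (PySem.Str.lower x) (PySem.Str.join "\n" (ts.map PySem.Str.lower))
      = ts.any (fun t => PySem.Str.isIn (PySem.Str.lower x) (PySem.Str.lower t)) := by
  rcases pv_opts_ok x hx with ⟨hp, hc⟩
  rw [Bool.eq_iff_iff, PySem.Str.isIn_iff_infix, List.any_eq_true]
  have hjoin : (PySem.Str.join "\n" (ts.map PySem.Str.lower)).toList
      = PySem.Chars.join ['\n'] ((ts.map PySem.Str.lower).map String.toList) := by
    rw [PySem.Str.toList_join]; rfl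
  rw [hjoin, PySem.Str.toList_lower,
    pv_isIn_join (PySem.Chars.lower x.toList) '\n' hp hc]
  constructor
  · rintro ⟨u, hu, hpu⟩
    rcases List.mem_map.mp hu with ⟨v, hv, rfl⟩
    rcases List.mem_map.mp hv with ⟨w, hw, rfl⟩
    exact ⟨w, hw, by
      rw [PySem.Str.isIn_iff_infix, PySem.Str.toList_lower]
      exact hpu⟩
  · rintro ⟨w, hw, hiw⟩
    refine ⟨(PySem.Str.lower w).toList, ?_, ?_⟩
    · exact List.mem_map_of_mem (List.mem_map_of_mem hw)
    · rw [PySem.Str.isIn_iff_infix, PySem.Str.toList_lower] at hiw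
      simpa [PySem.Str.toList_lower] using hiw

-- ===== VERDICT (by name: the statement is the Claim_ definition above) =====
theorem extract_flags_spec : Claim_equal_extract_flags := by
  intro trim_list _
  unfold Spec_extract_flags extract_flags extract_flags_alt
  have h := pv_outer TRIM_OPTIONS pv_inj
    (fun opt t => PySem.Str.isIn (PySem.Str.lower opt) (PySem.Str.lower t))
    (trim_list.getD []) (fun _ => 0) _ pv_init
  simp only [pvKey] at h
  simp only []
  rw [h]
  refine List.map_congr_left (fun x hx => ?_)
  rw [pv_blob x hx (trim_list.getD [])]
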